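-- pv_equiv track=rewrite | github.com/nbssdlkm/FicForge | src-python/core/services/generation.py | _next_draft_label
-- ===== SOURCE A (Python) =====
-- def _next_draft_label(existing_labels: list[str]) -> str:
--     """分配下一个草稿标签 A/B/C/D...."""
--     if not existing_labels:
--         return "A"
--     used = set(existing_labels)
--     for i in range(26):
--         label = chr(ord("A") + i)
--         if label not in used:
--             return label
--     return "Z"  # 极端情况
-- ===== SOURCE B (Python) =====
-- def _next_draft_label(existing_labels: list[str]) -> str:
--     """分配下一个草稿标签 A/B/C/D...."""
--     letters = {chr(c) for c in range(ord("A"), ord("Z") + 1)}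
--     return min(letters - set(existing_labels), default="Z")
-- ===== Notes on version B (the rewrite author's own statement) =====
-- stated objective: simpler
-- what changed: Replaces the explicit ordered for-loop scan with separate empty-list and all-used guards by a single expression: the set of letters A-Z minus the existing labels, then min with default 'Z'.
import Mathlib
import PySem

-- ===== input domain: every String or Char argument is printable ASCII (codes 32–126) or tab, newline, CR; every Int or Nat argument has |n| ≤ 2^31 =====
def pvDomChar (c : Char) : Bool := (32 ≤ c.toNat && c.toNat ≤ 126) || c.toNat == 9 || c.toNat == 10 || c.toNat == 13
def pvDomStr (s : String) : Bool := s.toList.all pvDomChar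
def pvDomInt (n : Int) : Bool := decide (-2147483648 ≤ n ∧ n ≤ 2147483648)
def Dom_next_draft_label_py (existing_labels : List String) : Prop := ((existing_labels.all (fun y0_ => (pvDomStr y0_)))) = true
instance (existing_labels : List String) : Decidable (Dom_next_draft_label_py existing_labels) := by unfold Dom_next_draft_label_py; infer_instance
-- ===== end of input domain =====

-- B replaces A's ordered scan with its empty/all-used guards by one expression: (letters A–Z minus existing) and min with default "Z"; objective: simpler.

-- ===== PORT A =====
-- the 'for i in range(26): … return label' early-return loop, step for step
def pvScanA (used : PySem.Set String) : List Int → String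
  | [] => "Z"  -- 极端情况
  | i :: rest =>
      let label := String.ofList [Char.ofNat (65 + i).toNat]  -- chr(ord("A") + i)
      if PySem.Set.contains used label then pvScanA used rest else label

def next_draft_label_py (existing_labels : List String) : String :=
  if existing_labels = [] then "A"
  else pvScanA (PySem.Set.ofList existing_labels) (PySem.List.pyRange 0 26 1)

-- ===== PORT B =====
-- letters = {chr(c) for c in range(ord("A"), ord("Z") + 1)}
def pvLettersB : PySem.Set String :=
  PySem.Set.ofList ((PySem.List.pyRange 65 91 1).map (fun c => String.ofList [Char.ofNat c.toNat]))

-- min(letters - set(existing_labels), default="Z")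
def next_draft_label_py_alt (existing_labels : List String) : String :=
  match PySem.List.min? (PySem.Set.diff pvLettersB (PySem.Set.ofList existing_labels)) (fun x => x) with
  | some m => m
  | none => "Z"

-- ===== PRECONDITION & SPEC =====
def Spec_next_draft_label_py (existing_labels : List String) (out : String) : Prop := out = next_draft_label_py_alt existing_labels
instance (existing_labels : List String) (out : String) : Decidable (Spec_next_draft_label_py existing_labels out) := by unfold Spec_next_draft_label_py; infer_instance

-- ===== CLAIM (what is proved, stated in full; the proofs are below) =====
def Claim_equal_next_draft_label_py : Prop := ∀ (existing_labels : List String), Dom_next_draft_label_py existing_labels → Spec_next_draft_label_py existing_labels (next_draft_label_py existing_labels)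

-- ===== LEMMAS AND PROOFS =====

def pvLetterOf (i : Int) : String := String.ofList [Char.ofNat (65 + i).toNat]

lemma foldl_min_left {κ : Type} [LinearOrder κ] (x : κ) (t : List κ)
    (h : ∀ y ∈ t, x ≤ y) : t.foldl min x = x := by
  induction t with
  | nil => rfl
  | cons a t ih =>
      simp only [List.foldl_cons, min_eq_left (h a (by simp))]
      exact ih (fun y hy => h y (by simp [hy]))

-- A's early-return scan over strictly increasing letters = min of the letters surviving the membership test
lemma scanA_eq_min (s : PySem.Set String) :
    ∀ (is : List Int), List.Pairwise (· < ·) (is.map pvLetterOf) →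
      pvScanA s is =
        (match PySem.List.min? ((is.map pvLetterOf).filter (fun l => !PySem.Set.contains s l)) (fun x => x) with
          | some m => m
          | none => "Z") := by
  intro is
  induction is with
  | nil => intro _; rfl
  | cons i rest ih =>
      intro hp
      rw [List.map_cons, List.pairwise_cons] at hp
      obtain ⟨hlt, hp'⟩ := hp
      show (if PySem.Set.contains s (pvLetterOf i) then pvScanA s rest else pvLetterOf i) = _
      rw [List.map_cons, List.filter_cons]
      by_cases hc : PySem.Set.contains s (pvLetterOf i)
      · simp only [hc, if_pos, Bool.not_true]
        exact ih hp'
      · simp only [hc, Bool.not_false, if_pos]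
        rw [PySem.List.min?_id_cons,
          foldl_min_left (pvLetterOf i) _
            (fun y hy => le_of_lt (hlt y (List.mem_of_mem_filter hy)))]
        simp

lemma pairwise_letters : List.Pairwise (· < ·) ((PySem.List.pyRange 0 26 1).map pvLetterOf) := by
  simp only [List.pairwise_map, pvLetterOf, String.lt_iff_toList_lt, String.toList_ofList]
  decide

lemma scan_all (xs : List String) :
    pvScanA (PySem.Set.ofList xs) (PySem.List.pyRange 0 26 1) = next_draft_label_py_alt xs := by
  unfold next_draft_label_py_alt
  rw [scanA_eq_min (PySem.Set.ofList xs) (PySem.List.pyRange 0 26 1) pairwise_letters]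
  have e2 : (PySem.List.pyRange 0 26 1).map pvLetterOf = (pvLettersB : List String) := by decide
  simp only [PySem.Set.diff, e2]

theorem pv_spec_aux : ∀ (existing_labels : List String),
    next_draft_label_py existing_labels = next_draft_label_py_alt existing_labels := by
  intro xs
  by_cases h : xs = []
  · subst h
    rw [show next_draft_label_py [] = "A" from rfl, ← scan_all []]
    decide
  · unfold next_draft_label_py
    rw [if_neg h]
    exact scan_all xs

-- ===== VERDICT (by name: the statement is the Claim_ definition above) =====
theorem next_draft_label_py_spec : Claim_equal_next_draft_label_py := by
  intro xs _
  exact pv_spec_aux xs
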